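-- pv_equiv track=rewrite | github.com/KevinZonda/path_walker | path_walker/walker.py | _first_wild_index
-- ===== SOURCE A (Python) =====
-- def _first_wild_index(s: str) -> int:
--     """Index of the first *, ?, or { in s (at top level).  -1 if none."""
--     depth = 0
--     for i, ch in enumerate(s):
--         if ch == '{':
--             return i  # the { itself is the start
--         elif ch == '*' or ch == '?':
--             return i
--     return -1
-- ===== SOURCE B (Python) =====
-- def _first_wild_index(s: str) -> int:
--     """Index of the first *, ?, or { in s.  -1 if none."""
--     hits = [p for p in (s.find('*'), s.find('?'), s.find('{')) if p >= 0]
--     return min(hits) if hits else -1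
-- ===== Notes on version B (the rewrite author's own statement) =====
-- stated objective: faster
-- what changed: Replaced A's Python-level character-by-character loop with three str.find library scans (one per wildcard char) whose non-negative results are filtered and the minimum taken.
import Mathlib
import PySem

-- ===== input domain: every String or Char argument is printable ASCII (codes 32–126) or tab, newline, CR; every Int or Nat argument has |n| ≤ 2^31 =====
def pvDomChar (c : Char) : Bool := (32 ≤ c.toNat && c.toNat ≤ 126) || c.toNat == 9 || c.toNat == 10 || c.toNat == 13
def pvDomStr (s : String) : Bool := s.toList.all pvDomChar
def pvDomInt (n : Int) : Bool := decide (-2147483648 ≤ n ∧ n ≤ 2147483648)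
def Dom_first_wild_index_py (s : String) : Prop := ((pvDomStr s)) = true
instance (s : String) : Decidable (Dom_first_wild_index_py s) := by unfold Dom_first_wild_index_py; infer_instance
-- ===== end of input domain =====

-- B replaces A's fused per-character loop by three str.find scans plus a filtered min (idiomatic).
-- (A's local variable 'depth' is dead code: it is initialised and never read or updated.)


-- ===== PORT A =====
-- the for-loop over enumerate(s): structural recursion carrying the running index
def fwAux : List Char → Nat → Int
  | [], _ => -1
  | ch :: rest, i =>
      if ch = '{' then (i : Int)
      else if ch = '*' ∨ ch = '?' then (i : Int)
      else fwAux rest (i + 1)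

def first_wild_index_py (s : String) : Int := fwAux s.toList 0

-- ===== PORT B =====
def first_wild_index_py_alt (s : String) : Int :=
  let a := PySem.Str.find s "*"
  let b := PySem.Str.find s "?"
  let c := PySem.Str.find s "{"
  let hits := [a, b, c].filter (fun p => decide (0 ≤ p))
  match PySem.List.min? hits (fun x => x) with
  | some m => m
  | none => -1

-- ===== PRECONDITION & SPEC =====
def Spec_first_wild_index_py (s : String) (out : Int) : Prop := out = first_wild_index_py_alt s
instance (s : String) (out : Int) : Decidable (Spec_first_wild_index_py s out) := by unfold Spec_first_wild_index_py; infer_instance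

-- ===== CLAIM (what is proved, stated in full; the proofs are below) =====
def Claim_equal_first_wild_index_py : Prop := ∀ (s : String), Dom_first_wild_index_py s → Spec_first_wild_index_py s (first_wild_index_py s)

-- ===== LEMMAS AND PROOFS =====

-- a singleton prefix of a drop is exactly a character at that index
lemma singleton_prefix_drop (l : List Char) (c : Char) (i : Nat) :
    [c] <+: l.drop i ↔ l[i]? = some c := by
  rw [← List.head?_drop]
  constructor
  · rintro ⟨t, ht⟩
    rw [← ht]; rfl
  · intro hd
    rcases hdr : l.drop i with _ | ⟨x, xs⟩
    · rw [hdr] at hd; simp at hd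
    · rw [hdr] at hd
      simp at hd
      exact ⟨xs, by simp [hd]⟩

-- PySem single-character find = List.findIdx?
lemma find_single (l : List Char) (c : Char) :
    PySem.Chars.find l [c] =
      (l.findIdx? (fun x => x == c)).elim (-1) (fun n => (n : Int)) := by
  rcases hfi : l.findIdx? (fun x => x == c) with _ | n
  · have hnm : c ∉ l := by
      intro hm
      rw [List.findIdx?_eq_none_iff] at hfi
      simpa using hfi c hm
    have hni : ¬ [c] <:+: l := fun hinf => hnm (hinf.subset (by simp))
    simp [(PySem.Chars.find_eq_neg_one_iff l [c]).mpr hni]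
  · rw [List.findIdx?_eq_some_iff_getElem] at hfi
    obtain ⟨hlt, hpc, hmin0⟩ := hfi
    have hget : l[n]? = some c := by
      rw [List.getElem?_eq_getElem hlt]
      simpa using hpc
    have hmin : ∀ i < n, l[i]? ≠ some c := by
      intro i hi hcontra
      have hi' : i < l.length := by
        by_contra h
        rw [List.getElem?_eq_none (by omega)] at hcontra
        simp at hcontra
      rw [List.getElem?_eq_getElem hi'] at hcontra
      exact hmin0 i hi (by simpa using hcontra)
    have hinf : [c] <:+: l :=
      (((singleton_prefix_drop l c n).mpr hget).isInfix).trans (l.drop_suffix n).isInfix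
    have hnn : 0 ≤ PySem.Chars.find l [c] := (PySem.Chars.find_nonneg_iff l [c]).mpr hinf
    obtain ⟨hpre, hlow⟩ := PySem.Chars.find_spec (s := l) (sub := [c]) hnn
    set m := (PySem.Chars.find l [c]).toNat with hm
    have hgm : l[m]? = some c := (singleton_prefix_drop l c m).mp hpre
    have hnm : n = m := by
      rcases lt_trichotomy n m with h | h | h
      · exact absurd ((singleton_prefix_drop l c n).mpr hget) (hlow n h)
      · exact h
      · exact absurd hgm (hmin m h)
    simp only [Option.elim]
    omega

abbrev wp : Char → Bool := fun c => c == '{' || c == '*' || c == '?'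

-- A's loop = findIdx? of the disjunct predicate, offset by the running index
lemma fwAux_eq (l : List Char) (k : Nat) :
    fwAux l k = (l.findIdx? wp).elim (-1) (fun n => ((k + n : Nat) : Int)) := by
  induction l generalizing k with
  | nil => simp [fwAux]
  | cons ch rest ih =>
      by_cases h1 : ch = '{'
      · simp [fwAux, h1, List.findIdx?_cons, wp]
      · by_cases h2 : ch = '*' ∨ ch = '?'
        · have : wp ch = true := by rcases h2 with h | h <;> simp [wp, h]
          simp [fwAux, h1, h2, List.findIdx?_cons, this]
        · have : wp ch = false := by
            push Not at h2
            simp [wp, h1, h2.1, h2.2]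
          simp only [fwAux, if_neg h1, if_neg h2, ih, List.findIdx?_cons, this,
            Bool.false_eq_true, if_false]
          rcases rest.findIdx? wp with _ | n <;> simp [Option.elim] <;> omega

-- findIdx? of an OR splits as the min of the two findIdx?'s
def omin : Option Nat → Option Nat → Option Nat
  | none, o => o
  | o, none => o
  | some a, some b => some (min a b)

lemma findIdx?_or (p q : Char → Bool) (l : List Char) :
    l.findIdx? (fun c => p c || q c) = omin (l.findIdx? p) (l.findIdx? q) := by
  induction l with
  | nil => simp [omin]
  | cons a t ih =>
      by_cases hp : p a
      · by_cases hq : q a <;> simp [List.findIdx?_cons, hp, hq, omin] <;>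
          rcases t.findIdx? q with _ | n <;> simp
      · by_cases hq : q a
        · simp [List.findIdx?_cons, hp, hq, omin]
          rcases t.findIdx? p with _ | n <;> simp
        · simp [List.findIdx?_cons, hp, hq, ih, omin]
          rcases t.findIdx? p with _ | n <;> rcases t.findIdx? q with _ | m <;>
            simp [omin]

lemma pymin0 : PySem.List.min? ([] : List Int) (fun x => x) = none := rfl

lemma pymin1 (a : Int) : PySem.List.min? [a] (fun x => x) = some a := by
  simp [PySem.List.min?]

lemma pymin2 (a b : Int) : PySem.List.min? [a, b] (fun x => x) = some (min a b) := by
  simp [PySem.List.min?, min_def]; split_ifs <;> (try simp_all) <;> omega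

lemma pymin3 (a b c : Int) :
    PySem.List.min? [a, b, c] (fun x => x) = some (min a (min b c)) := by
  simp [PySem.List.min?, min_def]; split_ifs <;> (try simp_all) <;> omega

-- ===== VERDICT (by name: the statement is the Claim_ definition above) =====
theorem first_wild_index_py_spec : Claim_equal_first_wild_index_py := by
  intro s _
  unfold Spec_first_wild_index_py first_wild_index_py first_wild_index_py_alt
  simp only [PySem.Str.find_eq]
  have hstar := find_single s.toList '*'
  have hq := find_single s.toList '?'
  have hbr := find_single s.toList '{'
  have hA : fwAux s.toList 0 = (s.toList.findIdx? wp).elim (-1) (fun n => (n : Int)) := by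
    rw [fwAux_eq]; rcases s.toList.findIdx? wp with _ | n <;> simp [Option.elim]
  have hsplit : s.toList.findIdx? wp =
      omin (s.toList.findIdx? (fun c => c == '{'))
        (omin (s.toList.findIdx? (fun c => c == '*')) (s.toList.findIdx? (fun c => c == '?'))) := by
    have h1 := findIdx?_or (fun c => c == '{') (fun c => c == '*' || c == '?') s.toList
    have h2 := findIdx?_or (fun c => c == '*') (fun c => c == '?') s.toList
    have hfe : (fun c => c == '{' || (c == '*' || c == '?')) = wp := by
      funext c; simp [wp, Bool.or_assoc]
    rw [← h2, ← h1, hfe]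
  rw [hA, hsplit]
  have hs : ("*" : String).toList = ['*'] := rfl
  have hq' : ("?" : String).toList = ['?'] := rfl
  have hb' : ("{" : String).toList = ['{'] := rfl
  rw [hs, hq', hb', hstar, hq, hbr]
  rcases s.toList.findIdx? (fun c => c == '{') with _ | x <;>
    rcases s.toList.findIdx? (fun c => c == '*') with _ | y <;>
    rcases s.toList.findIdx? (fun c => c == '?') with _ | z <;>
      simp [omin, Option.elim, List.filter, pymin0, pymin1, pymin2, pymin3, min_def] <;> (try split_ifs) <;> (try simp_all) <;> omega
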